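-- pv_equiv track=rewrite | github.com/rhythmcao/slu-dual-learning | utils/evaluator.py | calculate_slot_acc
-- ===== SOURCE A (Python) =====
-- def calculate_slot_acc(prediction, reference):
--     """
--     @args:
--         prediction: [${from_loc.city}, ${to_loc.city}]
--         reference: [${from_loc.city}, ${to_loc.city}]
--     @return:
--         p, q, N: missing, redundant and total slot num
--     """
--     p, N = 0, len(reference)
--     for s in reference:
--         if s not in prediction:
--             p += 1
--         else: # remove the first occurrence
--             prediction.remove(s)
--     q = len(prediction)
--     return p, q, N
-- ===== SOURCE B (Python) =====
-- def calculate_slot_acc(prediction, reference):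
--     """Count-table rewrite: build a count dict of reference, sweep prediction once,
--     collecting unmatched prediction slots; leaves prediction holding the redundant
--     leftovers exactly like the original (same in-place mutation)."""
--     need = {}
--     for s in reference:
--         need[s] = need.get(s, 0) + 1
--     redundant = []
--     for s in prediction:
--         if need.get(s, 0) > 0:
--             need[s] = need[s] - 1
--         else:
--             redundant.append(s)
--     prediction[:] = redundant
--     return sum(need.values()), len(redundant), len(reference)
-- ===== Notes on version B (the rewrite author's own statement) =====
-- stated objective: faster
-- what changed: Replaces the reference-driven scan with repeated `s in prediction` membership tests and list.remove by a count dict built from reference once plus a single prediction-driven sweep that collects the redundant leftovers explicitly (same return value and same final contents of prediction).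
import Mathlib
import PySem

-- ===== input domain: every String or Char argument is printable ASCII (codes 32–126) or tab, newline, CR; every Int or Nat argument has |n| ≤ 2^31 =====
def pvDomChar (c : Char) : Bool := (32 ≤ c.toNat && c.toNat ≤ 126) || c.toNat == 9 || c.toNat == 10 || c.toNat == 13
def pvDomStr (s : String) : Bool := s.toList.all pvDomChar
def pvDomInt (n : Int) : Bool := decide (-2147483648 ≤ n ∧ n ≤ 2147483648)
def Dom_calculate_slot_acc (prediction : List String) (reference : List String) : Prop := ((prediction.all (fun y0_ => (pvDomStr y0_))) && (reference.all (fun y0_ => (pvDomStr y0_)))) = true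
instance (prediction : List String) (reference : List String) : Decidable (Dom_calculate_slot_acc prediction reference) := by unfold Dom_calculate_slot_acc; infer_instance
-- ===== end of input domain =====

-- B replaces A's reference-driven scan (with list.remove inside) by a count table of the
-- reference plus one prediction-driven sweep collecting the redundant leftovers; same return
-- value everywhere (both Pythons also leave `prediction` holding the same leftover slots).


-- ===== PORT A =====
-- the body of A's `for s in reference` loop, state = (p, prediction)
def pvStepA (st : Int × List String) (s : String) : Int × List String :=
  if s ∉ st.2 then (st.1 + 1, st.2)
  else (st.1, (PySem.List.remove? st.2 s).getD st.2)

def calculate_slot_acc (prediction : List String) (reference : List String) : List Int :=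
  let p : Int := 0
  let N : Int := reference.length
  let st := reference.foldl pvStepA (p, prediction)
  let q : Int := st.2.length
  [st.1, q, N]

-- ===== PORT B =====
-- the body of B's `for s in prediction` loop, state = (need, redundant)
def pvStepB (st : PySem.Dict String Int × List String) (s : String) : PySem.Dict String Int × List String :=
  if st.1.getD s 0 > 0 then (st.1.insert s (st.1.getD s 0 - 1), st.2)
  else (st.1, st.2 ++ [s])

def calculate_slot_acc_alt (prediction : List String) (reference : List String) : List Int :=
  let need : PySem.Dict String Int :=
    reference.foldl (fun d s => d.insert s (d.getD s 0 + 1)) PySem.Dict.empty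
  let st := prediction.foldl pvStepB (need, [])
  [st.1.values.sum, (st.2.length : Int), (reference.length : Int)]

-- ===== PRECONDITION & SPEC =====
def Spec_calculate_slot_acc (prediction : List String) (reference : List String) (out : List Int) : Prop := out = calculate_slot_acc_alt prediction reference
instance (prediction : List String) (reference : List String) (out : List Int) : Decidable (Spec_calculate_slot_acc prediction reference out) := by unfold Spec_calculate_slot_acc; infer_instance

-- ===== CLAIM (what is proved, stated in full; the proofs are below) =====
def Claim_equal_calculate_slot_acc : Prop := ∀ (prediction : List String) (reference : List String), Dom_calculate_slot_acc prediction reference → Spec_calculate_slot_acc prediction reference (calculate_slot_acc prediction reference)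

-- ===== LEMMAS AND PROOFS =====

-- A's loop: p grows by the number of unmatched reference slots, prediction shrinks by the
-- number of matched ones; both are governed by the multiset intersection ↑ref ∩ ↑pred.
theorem pvA_loop (ref : List String) : ∀ (pred : List String) (p : Int),
    (ref.foldl pvStepA (p, pred)).1
      = p + ref.length - ((↑ref : Multiset String) ∩ ↑pred).card ∧
    (ref.foldl pvStepA (p, pred)).2.length + ((↑ref : Multiset String) ∩ ↑pred).card
      = pred.length := by
  induction ref with
  | nil => intro pred p; simp
  | cons s r ih =>
    intro pred p
    by_cases hs : s ∈ pred
    · have hrm : pvStepA (p, pred) s = (p, pred.erase s) := by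
        simp [pvStepA, hs, PySem.List.remove?_eq_some_erase pred s hs]
      have hms : s ∈ (↑pred : Multiset String) := by simpa using hs
      have hint : ((↑(s :: r) : Multiset String) ∩ ↑pred)
          = s ::ₘ ((↑r : Multiset String) ∩ (↑pred : Multiset String).erase s) := by
        rw [← Multiset.cons_coe]; exact Multiset.cons_inter_of_pos _ hms
      have hcoe : ((↑pred : Multiset String).erase s) = (↑(pred.erase s) : Multiset String) :=
        (Multiset.coe_erase pred s).symm
      obtain ⟨ih1, ih2⟩ := ih (pred.erase s) p
      have hlen : (pred.erase s).length + 1 = pred.length := by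
        have h3 := List.length_erase_of_mem hs
        have h4 := List.length_pos_of_mem hs
        omega
      constructor
      · rw [List.foldl_cons, hrm, ih1, hint, hcoe]
        simp only [Multiset.card_cons, List.length_cons]
        push_cast
        omega
      · rw [List.foldl_cons, hrm, hint, hcoe]
        simp only [Multiset.card_cons]
        omega
    · have hrm : pvStepA (p, pred) s = (p + 1, pred) := by simp [pvStepA, hs]
      have hms : s ∉ (↑pred : Multiset String) := by simpa using hs
      have hint : ((↑(s :: r) : Multiset String) ∩ ↑pred)
          = (↑r : Multiset String) ∩ (↑pred : Multiset String) := by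
        rw [← Multiset.cons_coe]; exact Multiset.cons_inter_of_neg _ hms
      obtain ⟨ih1, ih2⟩ := ih pred (p + 1)
      constructor
      · rw [List.foldl_cons, hrm, ih1, hint]
        simp only [List.length_cons]; push_cast; omega
      · rw [List.foldl_cons, hrm, hint]; omega

-- B's loop: if the dict holds exactly the multiplicities of the ghost multiset m, then after
-- the sweep it holds those of m - ↑pred, the key list is unchanged, and `redundant` grew by
-- the number of prediction slots not matched in m.
theorem pvB_loop (pred : List String) : ∀ (d : PySem.Dict String Int) (m : Multiset String)
    (red : List String), (∀ k, d.getD k 0 = (m.count k : Int)) →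
    (∀ k, (pred.foldl pvStepB (d, red)).1.getD k 0 = ((m - ↑pred).count k : Int)) ∧
    (pred.foldl pvStepB (d, red)).1.keys = d.keys ∧
    (pred.foldl pvStepB (d, red)).2.length + ((↑pred : Multiset String) ∩ m).card
      = red.length + pred.length := by
  induction pred with
  | nil => intro d m red h; simpa using h
  | cons s ps ih =>
    intro d m red h
    by_cases hs : s ∈ m
    · have hpos : d.getD s 0 > 0 := by
        rw [h s]; exact_mod_cast Multiset.count_pos.mpr hs
      have hstep : pvStepB (d, red) s = (d.insert s (d.getD s 0 - 1), red) := by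
        simp [pvStepB, hpos]
      have hcont : d.contains s = true := by
        by_contra hc
        have : d.getD s 0 = 0 := PySem.Dict.getD_of_not_contains d 0 (by simpa using hc)
        omega
      have h' : ∀ k, (d.insert s (d.getD s 0 - 1)).getD k 0 = ((m.erase s).count k : Int) := by
        intro k
        rw [PySem.Dict.getD_insert]
        by_cases hk : k = s
        · rw [if_pos hk, hk, h s, Multiset.count_erase_self]
          have := Multiset.count_pos.mpr hs
          omega
        · rw [if_neg hk, h k, Multiset.count_erase_of_ne hk]
      obtain ⟨ih1, ih2, ih3⟩ := ih (d.insert s (d.getD s 0 - 1)) (m.erase s) red h'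
      refine ⟨?_, ?_, ?_⟩
      · intro k
        rw [List.foldl_cons, hstep, ih1]
        have : m - ↑(s :: ps) = m.erase s - ↑ps := by
          show m - (s ::ₘ ↑ps) = m.erase s - ↑ps
          rw [Multiset.sub_cons]
        rw [this]
      · rw [List.foldl_cons, hstep, ih2, PySem.Dict.keys_insert_of_contains _ _ hcont]
      · rw [List.foldl_cons, hstep]
        have hint : ((↑(s :: ps) : Multiset String) ∩ m)
            = s ::ₘ ((↑ps : Multiset String) ∩ m.erase s) := by
          rw [← Multiset.cons_coe]; exact Multiset.cons_inter_of_pos _ hs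
        rw [hint]
        simp only [Multiset.card_cons, List.length_cons]
        omega
    · have hzero : d.getD s 0 = 0 := by
        rw [h s, Multiset.count_eq_zero_of_notMem hs]; rfl
      have hstep : pvStepB (d, red) s = (d, red ++ [s]) := by simp [pvStepB, hzero]
      have hme : m.erase s = m := Multiset.erase_of_notMem hs
      obtain ⟨ih1, ih2, ih3⟩ := ih d m (red ++ [s]) h
      refine ⟨?_, ?_, ?_⟩
      · intro k
        rw [List.foldl_cons, hstep, ih1]
        have : m - ↑(s :: ps) = m - ↑ps := by
          show m - (s ::ₘ ↑ps) = m - ↑ps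
          rw [Multiset.sub_cons, hme]
        rw [this]
      · rw [List.foldl_cons, hstep, ih2]
      · rw [List.foldl_cons, hstep]
        have hint : ((↑(s :: ps) : Multiset String) ∩ m)
            = (↑ps : Multiset String) ∩ m := by
          rw [← Multiset.cons_coe]; exact Multiset.cons_inter_of_neg _ hs
        rw [hint]
        have hrl : (red ++ [s]).length = red.length + 1 := by simp
        simp only [List.length_cons]
        omega

-- summing the multiplicities of m over a duplicate-free list covering m's support gives card m
theorem pvSum_counts : ∀ (l : List String), l.Nodup → ∀ (m : Multiset String),
    (∀ x ∈ m, x ∈ l) → (l.map (fun k => (m.count k : Int))).sum = m.card := by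
  intro l
  induction l with
  | nil =>
    intro _ m hm
    have : m = 0 := Multiset.eq_zero_of_forall_notMem (fun x hx => by simpa using hm x hx)
    simp [this]
  | cons a t ih =>
    intro hnd m hm
    have hat : a ∉ t := (List.nodup_cons.mp hnd).1
    have htnd : t.Nodup := (List.nodup_cons.mp hnd).2
    set m' := m.filter (fun x => x ≠ a) with hm'
    have hcnt : ∀ k ∈ t, m.count k = m'.count k := by
      intro k hk
      have hka : k ≠ a := fun e => hat (e ▸ hk)
      rw [hm', Multiset.count_filter]
      simp [hka]
    have hmapeq : t.map (fun k => (m.count k : Int)) = t.map (fun k => (m'.count k : Int)) := by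
      apply List.map_congr_left
      intro k hk; rw [hcnt k hk]
    have hsupp : ∀ x ∈ m', x ∈ t := by
      intro x hx
      have hxm : x ∈ m := Multiset.mem_of_mem_filter hx
      have hxa : x ≠ a := by
        have := Multiset.of_mem_filter hx; simpa using this
      cases hm x hxm with
      | head => exact absurd rfl hxa
      | tail _ h => exact h
    have hcard : m.count a + m'.card = m.card := by
      have h2 := congrArg Multiset.card (Multiset.filter_add_not (fun x => x = a) m)
      rw [Multiset.card_add, Multiset.filter_eq', Multiset.card_replicate] at h2
      have hnot : m.filter (fun x => ¬ x = a) = m' := by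
        rw [hm']
      rw [hnot] at h2
      exact h2
    rw [List.map_cons, List.sum_cons, hmapeq, ih htnd m' hsupp]
    omega

theorem calculate_slot_acc_eq (prediction reference : List String) :
    calculate_slot_acc prediction reference = calculate_slot_acc_alt prediction reference := by
  obtain ⟨hA1, hA2⟩ := pvA_loop reference prediction 0
  -- B's initial dict is Counter(reference)
  have hneed : reference.foldl (fun d s => d.insert s (d.getD s 0 + 1)) PySem.Dict.empty
      = PySem.Dict.counter reference := PySem.Dict.foldl_insert_getD_add_one_eq_counter reference
  have hinit : ∀ k, (PySem.Dict.counter reference).getD k 0 = ((↑reference : Multiset String).count k : Int) := by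
    intro k
    rw [PySem.Dict.getD_counter]
    simp
  obtain ⟨hB1, hB2, hB3⟩ :=
    pvB_loop prediction (PySem.Dict.counter reference) (↑reference) [] hinit
  set st := prediction.foldl pvStepB (PySem.Dict.counter reference, []) with hst
  have hkeys : st.1.keys = PySem.Set.ofList reference := by
    rw [hB2, PySem.Dict.keys_counter]
  have hknd : st.1.keys.Nodup := by rw [hB2]; exact PySem.Dict.nodup_keys_counter reference
  -- sum of final dict values = card (ref - pred)
  have hvals : st.1.values = st.1.keys.map (fun k => st.1.getD k 0) :=
    PySem.Dict.values_eq_map_keys st.1 hknd 0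
  have hsupp : ∀ x ∈ (↑reference : Multiset String) - ↑prediction, x ∈ st.1.keys := by
    intro x hx
    rw [hkeys, PySem.Set.mem_ofList]
    have : x ∈ (↑reference : Multiset String) :=
      Multiset.mem_of_le (Multiset.sub_le_self _ _) hx
    simpa using this
  have hsum : st.1.values.sum = (((↑reference : Multiset String) - ↑prediction).card : Int) := by
    rw [hvals]
    have : st.1.keys.map (fun k => st.1.getD k 0)
        = st.1.keys.map (fun k => ((((↑reference : Multiset String) - ↑prediction).count k : Int))) := by
      apply List.map_congr_left
      intro k _; rw [hB1 k]
    rw [this]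
    exact pvSum_counts st.1.keys hknd _ hsupp
  have hcardsub : ((↑reference : Multiset String) - ↑prediction).card
      + ((↑reference : Multiset String) ∩ ↑prediction).card = reference.length := by
    have := Multiset.sub_add_inter (↑reference : Multiset String) (↑prediction)
    have hcard := congrArg Multiset.card this
    rw [Multiset.card_add] at hcard
    simpa using hcard
  have hcomm : ((↑prediction : Multiset String) ∩ ↑reference)
      = ((↑reference : Multiset String) ∩ ↑prediction) := Multiset.inter_comm _ _
  rw [hcomm] at hB3
  simp only [calculate_slot_acc, calculate_slot_acc_alt, hneed, ← hst]
  rw [hA1, hsum]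
  have hq : (st.2.length : Int)
      = ((prediction.length : Int) - ((↑reference : Multiset String) ∩ ↑prediction).card) := by
    simp only [List.length_nil] at hB3
    omega
  have hq' : ((reference.foldl pvStepA (0, prediction)).2.length : Int)
      = (prediction.length : Int) - ((↑reference : Multiset String) ∩ ↑prediction).card := by
    omega
  rw [hq, hq']
  congr 1
  omega

-- ===== VERDICT (by name: the statement is the Claim_ definition above) =====
theorem calculate_slot_acc_spec : Claim_equal_calculate_slot_acc := by
  intro prediction reference _
  exact calculate_slot_acc_eq prediction reference
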